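-- pv_equiv track=rewrite | github.com/ecassmage/Python | PasswordManager/String_Generator.py | unlock_encrypt
-- ===== SOURCE A (Python) =====
-- def unlock_encrypt(word, lis):
--     string_temp = ""
--     list_of_important_stuff = []
--     direction = 0
--     word = list(word)
--     while True:
--         char = word[0]
--         if char == 'e':
--             break
--         elif char == ' ':
--             list_of_important_stuff.append(string_temp)
--             direction += 1
--             string_temp = ''
--         else:
--             if direction % 2 == 0:
--                 if lis.index(char) == len(lis) - 1:
--                     string_temp += lis[0]
--                 else:
--                     string_temp += lis[lis.index(char) + 1]
--             else:
--                 if lis.index(char) == 0: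
--                     string_temp += lis[-1]
--                 else:
--                     string_temp += lis[lis.index(char) - 1]
--         word.pop(0)
--     word.pop(0)
--     return list_of_important_stuff, ''.join(word)
-- ===== SOURCE B (Python) =====
-- def unlock_encrypt(word, lis):
--     # Segment-wise rewrite: cut at the first 'e', split the prefix on spaces, drop the
--     # trailing (unfinished) segment, and Caesar-shift segment k by +1/-1 (k even/odd)
--     # with wraparound done by a single modulo.
--     i = word.index('e')
--     head, tail = word[:i], word[i + 1:]
--     segs = head.split(' ')[:-1]
--     n = len(lis)
--     result = []
--     for k, seg in enumerate(segs):
--         d = 1 if k % 2 == 0 else -1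
--         result.append(''.join(lis[(lis.index(c) + d) % n] for c in seg))
--     return result, tail
-- ===== Notes on version B (the rewrite author's own statement) =====
-- stated objective: simpler
-- what changed: Replaces A's char-by-char while-loop state machine (running segment buffer, direction counter, pop(0), and branching wraparound if-ladders) with a partition at the first 'e', a split on spaces dropping the unfinished last segment, and a single modulo-based Caesar shift per segment.
import Mathlib
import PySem

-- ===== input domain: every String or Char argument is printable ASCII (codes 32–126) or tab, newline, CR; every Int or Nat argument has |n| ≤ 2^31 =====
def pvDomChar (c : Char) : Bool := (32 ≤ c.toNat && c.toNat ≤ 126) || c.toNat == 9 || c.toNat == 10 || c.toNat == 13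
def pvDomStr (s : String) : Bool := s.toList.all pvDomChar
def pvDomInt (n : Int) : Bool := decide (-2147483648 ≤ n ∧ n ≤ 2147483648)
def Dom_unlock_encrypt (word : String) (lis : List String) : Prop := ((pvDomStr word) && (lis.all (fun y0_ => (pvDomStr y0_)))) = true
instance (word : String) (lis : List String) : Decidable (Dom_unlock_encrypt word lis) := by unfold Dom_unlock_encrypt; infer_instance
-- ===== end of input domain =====

-- B replaces A's char-by-char while-loop state machine with partition-at-'e' / split-on-spaces /
-- one modulo Caesar shift per segment (objective: simpler). A pops from its local char list only.


-- ===== PORT A =====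
-- the shift applied to one char inside A's loop (the if-ladder of the 'else' branch);
-- none = ValueError from lis.index(char)
def aShift (lis : List String) (dir : Int) (c : Char) : Option String :=
  match PySem.List.index? lis (String.ofList [c]) with
  | none => none
  | some i =>
    if PySem.Int.mod dir 2 == 0 then
      if i = lis.length - 1 then PySem.List.pyGet? lis 0
      else PySem.List.pyGet? lis ((i : Int) + 1)
    else
      if i = 0 then PySem.List.pyGet? lis (-1)
      else PySem.List.pyGet? lis ((i : Int) - 1)

-- A's while loop; word is consumed left to right (word.pop(0)); string_temp carried as
-- List Char (exact: only ever joined back into strings); none = IndexError/ValueError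
def loopA (lis : List String) : List Char → List Char → List (List Char) → Int →
    Option (List (List Char) × List Char)
  | [], _, _, _ => none
  | c :: rest, temp, acc, dir =>
    if c = 'e' then some (acc, rest)
    else if c = ' ' then loopA lis rest [] (acc ++ [temp]) (dir + 1)
    else match aShift lis dir c with
      | none => none
      | some s => loopA lis rest (temp ++ s.toList) acc dir

def unlock_encrypt (word : String) (lis : List String) : List String × String :=
  match loopA lis word.toList [] [] 0 with
  | some (acc, rest) => (acc.map String.ofList, String.ofList rest)
  | none => ([], "")   -- Python raises here; excluded by Pre_unlock_encrypt

-- ===== PORT B =====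
def dOf (k : Nat) : Int := if k % 2 == 0 then 1 else -1   -- d = 1 if k % 2 == 0 else -1

-- lis[(lis.index(c) + d) % n]  (none = ValueError from lis.index)
def shiftChar (lis : List String) (d : Int) (c : Char) : Option (List Char) :=
  match PySem.List.index? lis (String.ofList [c]) with
  | none => none
  | some i => (PySem.List.pyGet? lis (PySem.Int.mod ((i : Int) + d) (lis.length : Int))).map String.toList

-- ''.join(lis[(lis.index(c) + d) % n] for c in seg)
def shiftSeg (lis : List String) (d : Int) : List Char → Option (List Char)
  | [] => some []
  | c :: cs =>
    match shiftChar lis d c with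
    | none => none
    | some v => (shiftSeg lis d cs).map (v ++ ·)

-- the for-loop over enumerate(segs)
def goB (lis : List String) : Nat → List (List Char) → Option (List (List Char))
  | _, [] => some []
  | k, s :: rest =>
    match shiftSeg lis (dOf k) s with
    | none => none
    | some v => (goB lis (k + 1) rest).map (v :: ·)

def unlock_encrypt_alt (word : String) (lis : List String) : List String × String :=
  let cs := word.toList
  match PySem.List.index? cs 'e' with   -- i = word.index('e'); none = ValueError (outside Pre_)
  | none => ([], "")
  | some i =>
    let head := PySem.List.slice cs none (some (i : Int))         -- word[:i]
    let tail := PySem.List.slice cs (some ((i : Int) + 1)) none   -- word[i+1:]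
    let segs := PySem.List.slice (PySem.Chars.splitOn head [' ']) none (some (-1))  -- head.split(' ')[:-1]
    match goB lis 0 segs with
    | some res => (res.map String.ofList, String.ofList tail)
    | none => ([], "")   -- Python raises here; excluded by Pre_unlock_encrypt

-- ===== PRECONDITION & SPEC =====
-- Pre_: exactly where A returns: word contains an 'e' (else IndexError from word[0] on the
-- emptied list) and every non-space char before the first 'e' occurs in lis (else ValueError
-- from lis.index).
def Pre_unlock_encrypt (word : String) (lis : List String) : Prop :=
  'e' ∈ word.toList ∧
  ((word.toList.takeWhile (· ≠ 'e')).all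
    (fun c => c == ' ' || (lis.map String.toList).contains [c])) = true
instance (word : String) (lis : List String) : Decidable (Pre_unlock_encrypt word lis) := by
  unfold Pre_unlock_encrypt; infer_instance
def pvWitness_unlock_encrypt : String × List String := ("ab cd e", ["a", "b", "c", "d"])

def Spec_unlock_encrypt (word : String) (lis : List String) (out : List String × String) : Prop := out = unlock_encrypt_alt word lis
instance (word : String) (lis : List String) (out : List String × String) : Decidable (Spec_unlock_encrypt word lis out) := by unfold Spec_unlock_encrypt; infer_instance

-- ===== CLAIM (what is proved, stated in full; the proofs are below) =====
def Claim_equal_unlock_encrypt : Prop := ∀ (word : String) (lis : List String), Dom_unlock_encrypt word lis → Pre_unlock_encrypt word lis → Spec_unlock_encrypt word lis (unlock_encrypt word lis)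

-- ===== LEMMAS AND PROOFS =====

-- unpack Pre_'s boolean char test into the membership form the main lemmas use
theorem pre_chars_ok (word : String) (lis : List String) (h : Pre_unlock_encrypt word lis) :
    ∀ c ∈ word.toList.takeWhile (· ≠ 'e'), c = ' ' ∨ String.ofList [c] ∈ lis := by
  intro c hc
  have := List.all_eq_true.mp h.2 c hc
  rcases Bool.or_eq_true_iff.mp this with h1 | h2
  · exact Or.inl (by simpa using h1)
  · right
    have : [c] ∈ lis.map String.toList := by simpa using h2
    obtain ⟨s, hs, he⟩ := List.mem_map.mp this
    simpa [← he] using hs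

-- proof-side model of head.split(' ') (pre = reversed current chunk already read)
def mySplit (pre : List Char) : List Char → List (List Char)
  | [] => [pre]
  | c :: t => if c = ' ' then pre :: mySplit [] t else mySplit (pre ++ [c]) t

-- proof-side model of the segment list both programs produce from the processed prefix
def F (lis : List String) (temp : List Char) (k : Nat) : List Char → List (List Char)
  | [] => []
  | c :: t =>
    if c = ' ' then temp :: F lis [] (k + 1) t
    else F lis (temp ++ ((shiftChar lis (dOf k) c).getD [])) k t

theorem go_space (fuel : Nat) : ∀ (l cur : List Char) (acc : List (List Char)),
    l.length < fuel →
    PySem.Chars.splitOn.go [' '] fuel l cur acc = acc.reverse ++ mySplit cur.reverse l := by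
  induction fuel with
  | zero => intro l cur acc h; simp at h
  | succ f ih =>
    intro l cur acc h
    match l with
    | [] => rw [PySem.Chars.splitOn.go.eq_def]; simp [mySplit]
    | c :: rest =>
      rw [PySem.Chars.splitOn.go.eq_def]
      by_cases hc : c = ' '
      · subst hc
        have hp : [' '].isPrefixOf (' ' :: rest) = true := by simp [List.isPrefixOf]
        simp only [hp, if_pos]
        have hdrop : List.drop [' '].length (' ' :: rest) = rest := rfl
        rw [hdrop, ih rest [] (cur.reverse :: acc) (by simpa using Nat.lt_of_succ_lt_succ h)]
        simp [mySplit]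
      · have hp : [' '].isPrefixOf (c :: rest) = false := by
          simp [List.isPrefixOf]; exact fun hh => absurd hh.symm hc
        simp only [hp]
        rw [ih rest (c :: cur) acc (by simpa using Nat.lt_of_succ_lt_succ h)]
        simp [mySplit, hc]

theorem splitOn_eq (h : List Char) : PySem.Chars.splitOn h [' '] = mySplit [] h := by
  show PySem.Chars.splitOn.go [' '] (h.length + 1) h [] [] = mySplit [] h
  rw [go_space (h.length + 1) h [] [] (by omega)]
  simp

theorem mySplit_ne_nil (t : List Char) (pre : List Char) : mySplit pre t ≠ [] := by
  induction t generalizing pre with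
  | nil => simp [mySplit]
  | cons c t ih =>
    by_cases hc : c = ' '
    · subst hc; simp [mySplit]
    · simp [mySplit, hc]; exact ih _

theorem mySplit_pre (t : List Char) : ∀ pre, ∃ s ss,
    mySplit [] t = s :: ss ∧ mySplit pre t = (pre ++ s) :: ss := by
  induction t with
  | nil => intro pre; exact ⟨[], [], by simp [mySplit]⟩
  | cons c t ih =>
    intro pre
    by_cases hc : c = ' '
    · subst hc; exact ⟨[], mySplit [] t, by simp [mySplit]⟩
    · obtain ⟨s, ss, h1, h2⟩ := ih [c]
      obtain ⟨s', ss', h1', h2'⟩ := ih (pre ++ [c])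
      rw [h1] at h1'
      injection h1' with e1 e2
      subst e1; subst e2
      refine ⟨c :: s, ss, ?_, ?_⟩
      · show mySplit [] (c :: t) = (c :: s) :: ss
        simp only [mySplit, if_neg hc, List.nil_append]
        rw [h2]; simp
      · show mySplit pre (c :: t) = (pre ++ c :: s) :: ss
        simp only [mySplit, if_neg hc]
        rw [h2']; simp

theorem mySplit_length (t : List Char) : ∀ pre, (mySplit pre t).length = t.count ' ' + 1 := by
  induction t with
  | nil => intro pre; simp [mySplit]
  | cons c t ih =>
    intro pre
    by_cases hc : c = ' '
    · subst hc; simp [mySplit, ih]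
    · simp [mySplit, hc, ih]

theorem F_nospace (lis : List String) (t : List Char) (hs : ' ' ∉ t) :
    ∀ temp k, F lis temp k t = [] := by
  induction t with
  | nil => intro temp k; simp [F]
  | cons c t ih =>
    intro temp k
    have hc : c ≠ ' ' := fun h => hs (h ▸ List.mem_cons_self)
    have ht : ' ' ∉ t := fun h => hs (List.mem_cons_of_mem _ h)
    simp [F, hc, ih ht]

theorem F_temp (lis : List String) (t : List Char) : ∀ temp k,
    F lis temp k t = match F lis [] k t with
      | [] => []
      | y :: ys => (temp ++ y) :: ys := by
  induction t with
  | nil => intro temp k; simp [F]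
  | cons c t ih =>
    intro temp k
    by_cases hc : c = ' '
    · subst hc; simp [F]
    · simp only [F, if_neg hc]
      simp only [List.nil_append]
      rw [ih (temp ++ ((shiftChar lis (dOf k) c).getD [])), ih ((shiftChar lis (dOf k) c).getD [])]
      cases F lis [] k t with
      | nil => rfl
      | cons y ys => simp

theorem index?_some_of_mem (lis : List String) (c : Char) (hc : String.ofList [c] ∈ lis) :
    ∃ i, PySem.List.index? lis (String.ofList [c]) = some i ∧ i < lis.length := by
  obtain ⟨i, hi⟩ := Option.isSome_iff_exists.mp ((PySem.List.index?_isSome_iff lis _).mpr hc)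
  obtain ⟨hlt, -, -⟩ := PySem.List.getElem_of_index?_eq_some hi
  exact ⟨i, hi, hlt⟩

theorem shiftChar_some (lis : List String) (c : Char) (k : Nat)
    (hc : String.ofList [c] ∈ lis) : ∃ v, shiftChar lis (dOf k) c = some v := by
  obtain ⟨i, hi, hlt⟩ := index?_some_of_mem lis c hc
  have hn : (0 : Int) < lis.length := by exact_mod_cast Nat.lt_of_le_of_lt (Nat.zero_le i) hlt
  have h0 := PySem.Int.mod_nonneg ((i : Int) + dOf k) hn
  have h1 := PySem.Int.mod_lt ((i : Int) + dOf k) hn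
  have hg := PySem.List.pyGet?_eq_some_getElem lis h0 h1
  have hi' : List.idxOf? (String.ofList [c]) lis = some i := by
    rw [← PySem.List.index?_eq_idxOf?]; exact hi
  refine ⟨(lis[(PySem.Int.mod ((i : Int) + dOf k) lis.length).toNat]'(by omega)).toList, ?_⟩
  simp [shiftChar, hi', hg]

theorem aShift_eq (lis : List String) (c : Char) (k : Nat) (hc : String.ofList [c] ∈ lis) :
    ∃ s : String, aShift lis (k : Int) c = some s ∧ shiftChar lis (dOf k) c = some s.toList := by
  obtain ⟨i, hi, hlt⟩ := index?_some_of_mem lis c hc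
  have hn : (0 : Int) < lis.length := by exact_mod_cast Nat.lt_of_le_of_lt (Nat.zero_le i) hlt
  have hnn : 0 < lis.length := by exact_mod_cast hn
  have hmodk : PySem.Int.mod (k : Int) 2 = ((k % 2 : Nat) : Int) := PySem.Int.mod_natCast k 2
  have hi' : List.idxOf? (String.ofList [c]) lis = some i := by
    rw [← PySem.List.index?_eq_idxOf?]; exact hi
  by_cases hk : k % 2 = 0
  · -- direction even, shift +1
    have hd : dOf k = 1 := by simp [dOf, hk]
    by_cases hi1 : i = lis.length - 1
    · have harg : PySem.Int.mod ((i : Int) + dOf k) (lis.length : Int) = 0 := by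
        rw [hd]
        have : (i : Int) + 1 = (lis.length : Int) := by omega
        rw [this]
        rw [show ((lis.length : Int) = ((lis.length : Nat) : Int)) from rfl, PySem.Int.mod_natCast]
        simp
      have hg := PySem.List.pyGet?_eq_some_getElem lis (i := 0) le_rfl hn
      refine ⟨lis[(0 : Int).toNat]'(by simpa using hnn), ?_, ?_⟩
      · have hdvd : (2 : Int) ∣ (k : Int) := by omega
        simp [aShift, hi', hdvd, hi1, hg]
      · simp [shiftChar, hi', harg, hg]
    · have hlt1 : i + 1 < lis.length := by omega
      have harg : PySem.Int.mod ((i : Int) + dOf k) (lis.length : Int) = ((i : Int) + 1) := by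
        rw [hd]
        have : (i : Int) + 1 = (((i + 1 : Nat) : Int)) := by push_cast; ring
        rw [this, PySem.Int.mod_natCast]
        rw [Nat.mod_eq_of_lt hlt1]
      have hg := PySem.List.pyGet?_eq_some_getElem lis (i := (i : Int) + 1)
        (by omega) (by exact_mod_cast hlt1)
      refine ⟨lis[((i : Int) + 1).toNat]'(by omega), ?_, ?_⟩
      · have hdvd : (2 : Int) ∣ (k : Int) := by omega
        simp [aShift, hi', hdvd, hi1, hg]
      · simp [shiftChar, hi', harg, hg]
  · -- direction odd, shift -1
    have hk1 : k % 2 = 1 := Nat.mod_two_eq_zero_or_one k |>.resolve_left hk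
    have hd : dOf k = -1 := by simp [dOf, hk]
    by_cases hi0 : i = 0
    · have harg : PySem.Int.mod ((i : Int) + dOf k) (lis.length : Int) = (lis.length : Int) - 1 := by
        rw [hd, PySem.Int.mod_eq_emod_of_pos hn]
        have : (i : Int) + -1 = -1 := by omega
        rw [this]
        have e1 : (-1 : Int) = ((lis.length : Int) - 1) + (lis.length : Int) * (-1) := by ring
        rw [e1, Int.add_mul_emod_self_left, Int.emod_eq_of_lt (by omega) (by omega)]
      have hg := PySem.List.pyGet?_eq_some_getElem lis (i := (lis.length : Int) - 1)
        (by omega) (by omega)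
      have hlast : PySem.List.pyGet? lis (-1) = PySem.List.pyGet? lis ((lis.length : Int) - 1) := by
        rw [PySem.List.pyGet?_neg_one, hg, List.getLast?_eq_getElem?]
        have : ((lis.length : Int) - 1).toNat = lis.length - 1 := by omega
        simp [this, List.getElem?_eq_getElem (by omega : lis.length - 1 < lis.length)]
      refine ⟨lis[((lis.length : Int) - 1).toNat]'(by omega), ?_, ?_⟩
      · have hndvd : ¬ (2 : Int) ∣ (k : Int) := by omega
        simp [aShift, hi', hndvd, hi0, hlast, hg]
      · simp [shiftChar, hi', harg, hg]
    · have harg : PySem.Int.mod ((i : Int) + dOf k) (lis.length : Int) = (i : Int) - 1 := by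
        rw [hd, PySem.Int.mod_eq_emod_of_pos hn]
        have h2 : (i : Int) + -1 = (i : Int) - 1 := by ring
        rw [h2, Int.emod_eq_of_lt (by omega) (by exact_mod_cast (by omega : (i : Int) - 1 < lis.length))]
      have hg := PySem.List.pyGet?_eq_some_getElem lis (i := (i : Int) - 1)
        (by omega) (by exact_mod_cast (by omega : (i : Int) - 1 < (lis.length : Int)))
      refine ⟨lis[((i : Int) - 1).toNat]'(by omega), ?_, ?_⟩
      · have hndvd : ¬ (2 : Int) ∣ (k : Int) := by omega
        simp [aShift, hi', hndvd, hi0, hg]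
      · simp [shiftChar, hi', harg, hg]

theorem loopA_eq (lis : List String) (w : List Char) :
    ('e' ∈ w) → (∀ c ∈ w.takeWhile (· ≠ 'e'), c = ' ' ∨ String.ofList [c] ∈ lis) →
    ∀ (temp : List Char) (acc : List (List Char)) (k : Nat),
    loopA lis w temp acc (k : Int) =
      some (acc ++ F lis temp k (w.takeWhile (· ≠ 'e')), (w.dropWhile (· ≠ 'e')).drop 1) := by
  induction w with
  | nil => intro he; simp at he
  | cons c rest ih =>
    intro he hok temp acc k
    by_cases hce : c = 'e'
    · subst hce
      simp [loopA, F]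
    · by_cases hcs : c = ' '
      · subst hcs
        have he' : 'e' ∈ rest := (List.mem_cons.mp he).resolve_left (by decide)
        have htw : (' ' :: rest).takeWhile (· ≠ 'e') = ' ' :: rest.takeWhile (· ≠ 'e') := by
          simp
        have hok' : ∀ x ∈ rest.takeWhile (· ≠ 'e'), x = ' ' ∨ String.ofList [x] ∈ lis := by
          intro x hx
          apply hok; rw [htw]; exact List.mem_cons_of_mem _ hx
        have hcast : ((k : Int) + 1) = ((k + 1 : Nat) : Int) := by push_cast; ring
        simp only [loopA, if_neg (by decide : ¬(' ' = 'e')), hcast]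
        rw [ih he' hok' [] (acc ++ [temp]) (k + 1)]
        simp [F]
      · have he' : 'e' ∈ rest := (List.mem_cons.mp he).resolve_left (fun h => hce h.symm)
        have htw : (c :: rest).takeWhile (· ≠ 'e') = c :: rest.takeWhile (· ≠ 'e') := by
          simp [hce]
        have hmem : String.ofList [c] ∈ lis := by
          have := hok c (by rw [htw]; exact List.mem_cons_self)
          exact this.resolve_left hcs
        have hok' : ∀ x ∈ rest.takeWhile (· ≠ 'e'), x = ' ' ∨ String.ofList [x] ∈ lis := by
          intro x hx
          apply hok; rw [htw]; exact List.mem_cons_of_mem _ hx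
        obtain ⟨s, hA, hB⟩ := aShift_eq lis c k hmem
        simp only [loopA, if_neg hce, if_neg hcs, hA]
        rw [ih he' hok' (temp ++ s.toList) acc k]
        simp [F, hce, hcs, hB]

theorem goB_eq (lis : List String) (t : List Char)
    (hok : ∀ c ∈ t, c = ' ' ∨ String.ofList [c] ∈ lis) : ∀ k : Nat,
    goB lis k (mySplit [] t).dropLast = some (F lis [] k t) := by
  induction t with
  | nil => intro k; simp [mySplit, goB, F]
  | cons c t ih =>
    intro k
    have hok' : ∀ x ∈ t, x = ' ' ∨ String.ofList [x] ∈ lis :=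
      fun x hx => hok x (List.mem_cons_of_mem _ hx)
    by_cases hc : c = ' '
    · subst hc
      have hne := mySplit_ne_nil t ([] : List Char)
      rw [show mySplit [] (' ' :: t) = [] :: mySplit [] t from by simp [mySplit]]
      rw [List.dropLast_cons_of_ne_nil hne]
      simp only [goB, shiftSeg]
      rw [ih hok' (k + 1)]
      simp [F]
    · have hmem : String.ofList [c] ∈ lis :=
        (hok c List.mem_cons_self).resolve_left hc
      obtain ⟨s0, ss, hsplit0, hsplitc⟩ := mySplit_pre t [c]
      have hsplit : mySplit [] (c :: t) = (c :: s0) :: ss := by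
        simp only [mySplit, if_neg hc, List.nil_append]
        simpa using hsplitc
      obtain ⟨vc, hvc⟩ := shiftChar_some lis c k hmem
      by_cases hss : ss = []
      · subst hss
        have hcount : t.count ' ' = 0 := by
          have := mySplit_length t ([] : List Char)
          rw [hsplit0] at this
          simpa using this
        have hnos : ' ' ∉ t := by
          intro hmm
          exact absurd hcount (by simpa [List.count_eq_zero] using hmm)
        rw [hsplit]
        rw [show ((c :: s0) :: ([] : List (List Char))).dropLast = [] from rfl]
        simp [goB, F, hc, F_nospace lis t hnos]
      · rw [hsplit, List.dropLast_cons_of_ne_nil hss]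
        have hIH := ih hok' k
        rw [hsplit0, List.dropLast_cons_of_ne_nil hss] at hIH
        simp only [goB] at hIH ⊢
        cases hsg : shiftSeg lis (dOf k) s0 with
        | none => rw [hsg] at hIH; simp at hIH
        | some v0 =>
          rw [hsg] at hIH
          cases hgb : goB lis (k + 1) ss.dropLast with
          | none => rw [hgb] at hIH; simp at hIH
          | some M =>
            rw [hgb] at hIH
            have hF : F lis [] k t = v0 :: M := by
              simp at hIH
              exact hIH.symm
            have hsgc : shiftSeg lis (dOf k) (c :: s0) = some (vc ++ v0) := by
              simp [shiftSeg, hvc, hsg]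
            have hFc : F lis [] k (c :: t) = (vc ++ v0) :: M := by
              simp only [F, if_neg hc, hvc, List.nil_append, Option.getD_some]
              rw [F_temp lis t vc k, hF]
            rw [hsgc]
            simp [hFc]

-- ===== VERDICT (by name: the statement is the Claim_ definition above) =====
theorem tw_dw (pre suf : List Char) (hp : 'e' ∉ pre) :
    (pre ++ 'e' :: suf).takeWhile (· ≠ 'e') = pre ∧
    (pre ++ 'e' :: suf).dropWhile (· ≠ 'e') = 'e' :: suf := by
  induction pre with
  | nil => simp
  | cons a t ih =>
    have ha : a ≠ 'e' := fun h => hp (h ▸ List.mem_cons_self)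
    have ht : 'e' ∉ t := fun h => hp (List.mem_cons_of_mem _ h)
    obtain ⟨ih1, ih2⟩ := ih ht
    constructor
    · rw [List.cons_append, List.takeWhile_cons_of_pos (by simp [ha]), ih1]
    · rw [List.cons_append, List.dropWhile_cons_of_pos (by simp [ha]), ih2]

theorem unlock_encrypt_spec : Claim_equal_unlock_encrypt := by
  intro word lis _ hpre
  have he := hpre.1
  have hok := pre_chars_ok word lis hpre
  show unlock_encrypt word lis = unlock_encrypt_alt word lis
  obtain ⟨i, hi⟩ := Option.isSome_iff_exists.mp
    ((PySem.List.index?_isSome_iff word.toList 'e').mpr he)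
  obtain ⟨pre, suf, hcs, hlen, hpe⟩ := (PySem.List.index?_eq_some_iff word.toList 'e' i).mp hi
  subst hlen
  obtain ⟨htw, hdw⟩ := tw_dw pre suf hpe
  unfold unlock_encrypt unlock_encrypt_alt
  rw [hcs] at hok hi ⊢
  have hok_pre : ∀ c ∈ pre, c = ' ' ∨ String.ofList [c] ∈ lis := by rw [htw] at hok; exact hok
  have h1 := loopA_eq lis (pre ++ 'e' :: suf) (by simp) hok [] [] 0
  simp only [Nat.cast_zero, List.nil_append, htw, hdw, List.drop_succ_cons, List.drop_zero] at h1
  have h2 := goB_eq lis pre hok_pre 0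
  have htake : PySem.List.slice (pre ++ 'e' :: suf) none (some ((pre.length : Nat) : Int)) = pre := by
    rw [PySem.List.slice_to_natCast, List.take_left]
  have hdrop : PySem.List.slice (pre ++ 'e' :: suf) (some (((pre.length : Nat) : Int) + 1)) none = suf := by
    have hc : ((pre.length : Nat) : Int) + 1 = (((pre.length + 1 : Nat)) : Int) := by push_cast; ring
    rw [hc, PySem.List.slice_from_natCast]
    rw [show pre ++ 'e' :: suf = (pre ++ ['e']) ++ suf from by simp,
        show pre.length + 1 = (pre ++ ['e']).length from by simp, List.drop_left]
  rw [h1]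
  simp only [hi, htake, hdrop, splitOn_eq, PySem.List.slice_to_neg_one, h2]
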